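-- pv_equiv track=rewrite | github.com/Y4n9JX/tg-bgp-route-bot | app/analyze.py | _clean_as_path
-- ===== SOURCE A (Python) =====
-- def _clean_as_path(as_path: list[int]) -> list[int]:
--
--     out = []
--
--     prev = None
--
--     for a in as_path:
--
--         if a == 0:
--
--             continue
--
--         if prev == a:
--
--             continue
--
--         out.append(a)
--
--         prev = a
--
--     return out
-- ===== SOURCE B (Python) =====
-- def _clean_as_path(as_path: list[int]) -> list[int]:
--     xs = [x for x in as_path if x != 0]
--     out = []
--     i = 0
--     n = len(xs)
--     while i < n:
--         h = xs[i]
--         out.append(h)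
--         while i < n and xs[i] == h:   # skip the whole run of h
--             i += 1
--     return out
-- ===== Notes on version B (the rewrite author's own statement) =====
-- stated objective: alternative
-- what changed: Replaced A's single stateful loop (mutable prev, one comparison of each element against the previously kept value) by a zero-filter pass followed by run-skipping: an outer loop takes the head of each maximal run of equal values and an inner loop jumps the index past the whole run, with no prev variable.
import Mathlib
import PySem

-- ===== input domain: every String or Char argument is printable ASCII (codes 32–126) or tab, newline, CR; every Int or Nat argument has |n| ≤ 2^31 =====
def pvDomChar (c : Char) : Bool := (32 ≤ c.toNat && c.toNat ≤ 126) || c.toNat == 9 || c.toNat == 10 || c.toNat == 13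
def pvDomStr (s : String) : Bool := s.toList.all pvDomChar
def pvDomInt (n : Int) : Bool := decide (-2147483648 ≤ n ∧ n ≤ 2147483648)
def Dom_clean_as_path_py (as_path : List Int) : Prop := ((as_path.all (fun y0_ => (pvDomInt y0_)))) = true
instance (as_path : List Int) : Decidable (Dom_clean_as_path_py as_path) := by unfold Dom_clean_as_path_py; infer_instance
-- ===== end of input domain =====

-- B replaces A's single stateful loop (mutable out/prev, one comparison per element against the
-- previous kept value) by a zero-filter pass followed by recursion on maximal runs of equal
-- values (take each run's head, skip the run, recurse) — no prev variable ("alternative").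

-- ===== PORT A =====
-- single pass with accumulator (out, prev), appending to out when a ≠ 0 and prev ≠ a
def clean_as_path_py (as_path : List Int) : List Int :=
  (as_path.foldl
    (fun (s : List Int × Option Int) a =>
      if a = 0 then s
      else if s.2 = some a then s
      else (s.1 ++ [a], some a))
    ([], none)).1

-- ===== PORT B =====
-- outer while over the remaining suffix xs[i:]: take h = xs[i], append it, inner while skips the
-- whole run (i.e. drops h and every following equal element = dropWhile on the tail); ported as
-- recursion on the remaining suffix
def pvHeadsB : List Int → List Int
  | [] => []
  | h :: t => h :: pvHeadsB (t.dropWhile (fun y => y == h))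
termination_by l => l.length
decreasing_by
  simpa using Nat.lt_succ_of_le (List.length_dropWhile_le _ _)

-- xs = [x for x in as_path if x != 0]; then the run-skipping loop above
def clean_as_path_py_alt (as_path : List Int) : List Int :=
  pvHeadsB (as_path.filter (fun x => decide (x ≠ 0)))

-- ===== PRECONDITION & SPEC =====
def Spec_clean_as_path_py (as_path : List Int) (out : List Int) : Prop := out = clean_as_path_py_alt as_path
instance (as_path : List Int) (out : List Int) : Decidable (Spec_clean_as_path_py as_path out) := by unfold Spec_clean_as_path_py; infer_instance

-- ===== CLAIM (what is proved, stated in full; the proofs are below) =====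
def Claim_equal_clean_as_path_py : Prop := ∀ (as_path : List Int), Dom_clean_as_path_py as_path → Spec_clean_as_path_py as_path (clean_as_path_py as_path)

-- ===== LEMMAS AND PROOFS =====

-- proof-only intermediate: collapse consecutive duplicates given the previous element
def pvCollapse (prev : Option Int) : List Int → List Int
  | [] => []
  | x :: xs => if prev = some x then pvCollapse prev xs else x :: pvCollapse (some x) xs

theorem pvFold_eq (l : List Int) : ∀ (out : List Int) (prev : Option Int),
    (l.foldl
      (fun (s : List Int × Option Int) a =>
        if a = 0 then s
        else if s.2 = some a then s
        else (s.1 ++ [a], some a))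
      (out, prev)).1 = out ++ pvCollapse prev (l.filter (fun x => decide (x ≠ 0))) := by
  induction l with
  | nil => intro out prev; simp [pvCollapse]
  | cons a l ih =>
    intro out prev
    by_cases ha : a = 0
    · simp [List.foldl, ha, ih]
    · by_cases hp : prev = some a
      · simp [List.foldl, ha, hp, ih, pvCollapse]
      · simp [List.foldl, ha, hp, ih, pvCollapse]

theorem pvCollapse_skip (t : List Int) : ∀ (h : Int),
    pvCollapse (some h) t = pvCollapse (some h) (t.dropWhile (fun y => y == h)) := by
  induction t with
  | nil => intro h; simp
  | cons x xs ih =>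
    intro h
    by_cases hx : x = h
    · simp [pvCollapse, hx, ih]
    · have hb : (x == h) = false := by simpa using hx
      simp [List.dropWhile, hb]

theorem pvCollapse_eq_heads (l : List Int) : pvCollapse none l = pvHeadsB l := by
  induction l using pvHeadsB.induct with
  | case1 => simp [pvCollapse, pvHeadsB]
  | case2 h t ih =>
    have hd : ∀ r : List Int, r = t.dropWhile (fun y => y == h) →
        pvCollapse (some h) r = pvCollapse none r := by
      intro r hr
      cases r with
      | nil => simp [pvCollapse]
      | cons x xs =>
        have hx : ¬ (x = h) := by
          have := List.head?_dropWhile_not (p := fun y => y == h) (l := t)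
          rw [← hr] at this
          simpa using this
        have hne : ¬ (some h = some x) := by simpa using fun hc : h = x => hx hc.symm
        simp [pvCollapse, hne]
    rw [pvHeadsB, ← ih, ← hd _ rfl, ← pvCollapse_skip]
    simp [pvCollapse]

-- ===== VERDICT (by name: the statement is the Claim_ definition above) =====
theorem clean_as_path_py_spec : Claim_equal_clean_as_path_py := by
  intro as_path _
  unfold Spec_clean_as_path_py clean_as_path_py clean_as_path_py_alt
  rw [pvFold_eq, pvCollapse_eq_heads]
  simp
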